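-- pv_equiv track=rewrite | github.com/Aziz4785/stylist.ai | ZALANDO_SCRAPER/metadata_generator.py | remove_artificial_fabric
-- ===== SOURCE A (Python) =====
-- def remove_artificial_fabric(text):
--     words_to_replace = ["viscose", "acetate", "rayon", "Viscose", "Acetate", "Rayon"]
--     found = False
--     new_text = text
--
--     for word in words_to_replace:
--         if word in new_text:
--             found = True
--             new_text = new_text.replace(word, "unknown")
--
--     return found, new_text
-- ===== SOURCE B (Python) =====
-- FABRIC_WORDS = ("viscose", "acetate", "rayon", "Viscose", "Acetate", "Rayon")
--
-- def remove_artificial_fabric(text):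
--     # single left-to-right scan: at each position, replace whichever fabric
--     # word starts there (the six words never overlap each other), else copy.
--     out = []
--     i = 0
--     n = len(text)
--     found = False
--     while i < n:
--         for w in FABRIC_WORDS:
--             if text.startswith(w, i):
--                 out.append("unknown")
--                 i += len(w)
--                 found = True
--                 break
--         else:
--             out.append(text[i])
--             i += 1
--     return found, "".join(out)
-- ===== Notes on version B (the rewrite author's own statement) =====
-- stated objective: alternative
-- what changed: A runs six sequential full-string .replace passes (one per fabric word); B makes a single left-to-right scan that replaces whichever of the six words starts at the current position, collecting the pieces once.
import Mathlib
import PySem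

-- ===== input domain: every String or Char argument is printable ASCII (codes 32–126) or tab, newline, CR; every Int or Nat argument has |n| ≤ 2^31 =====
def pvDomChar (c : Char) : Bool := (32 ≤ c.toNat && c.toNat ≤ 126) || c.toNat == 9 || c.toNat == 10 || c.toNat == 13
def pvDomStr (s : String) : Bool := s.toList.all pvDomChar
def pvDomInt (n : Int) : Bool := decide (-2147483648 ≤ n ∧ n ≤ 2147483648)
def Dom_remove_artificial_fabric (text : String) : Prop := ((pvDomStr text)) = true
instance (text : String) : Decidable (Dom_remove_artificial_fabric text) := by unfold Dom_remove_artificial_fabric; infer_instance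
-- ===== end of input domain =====

-- B replaces A's six sequential full-string .replace passes by one left-to-right
-- scan that substitutes whichever fabric word starts at the current position
-- (objective: alternative single-pass algorithm; same return value).

-- ===== PORT A =====
def remove_artificial_fabric (text : String) : Bool × String :=
  ["viscose", "acetate", "rayon", "Viscose", "Acetate", "Rayon"].foldl
    (fun st word =>
      if PySem.Str.isIn word st.2 then (true, PySem.Str.replace st.2 word "unknown") else st)
    (false, text)

-- ===== PORT B =====
def fabricWords : List (List Char) :=
  ["viscose".toList, "acetate".toList, "rayon".toList,
   "Viscose".toList, "Acetate".toList, "Rayon".toList]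

-- the while-loop of Source B as recursion over the remaining characters; the inner
-- for/break over FABRIC_WORDS is fabricWords.find?
def fabricScan : List Char → Bool × List Char
  | [] => (false, [])
  | c :: t =>
    match fabricWords.find? (fun w => w.isPrefixOf (c :: t)) with
    | some w =>
      let p := fabricScan (t.drop (w.length - 1))
      (true, "unknown".toList ++ p.2)
    | none =>
      let p := fabricScan t
      (p.1, c :: p.2)
termination_by l => l.length
decreasing_by
  · simp only [List.length_drop, List.length_cons]; omega
  · simp only [List.length_cons]; omega

def remove_artificial_fabric_alt (text : String) : Bool × String :=
  let p := fabricScan text.toList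
  (p.1, String.ofList p.2)

-- ===== PRECONDITION & SPEC =====
def Spec_remove_artificial_fabric (text : String) (out : Bool × String) : Prop := out = remove_artificial_fabric_alt text
instance (text : String) (out : Bool × String) : Decidable (Spec_remove_artificial_fabric text out) := by unfold Spec_remove_artificial_fabric; infer_instance

-- ===== CLAIM (what is proved, stated in full; the proofs are below) =====
def Claim_equal_remove_artificial_fabric : Prop := ∀ (text : String), Dom_remove_artificial_fabric text → Spec_remove_artificial_fabric text (remove_artificial_fabric text)

-- ===== LEMMAS AND PROOFS =====

def repS (w : List Char) : List Char → List Char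
  | [] => []
  | c :: t =>
    if w.isPrefixOf (c :: t) then "unknown".toList ++ repS w (t.drop (w.length - 1))
    else c :: repS w t
termination_by l => l.length
decreasing_by
  · simp only [List.length_drop, List.length_cons]; omega
  · simp only [List.length_cons]; omega

theorem pref_cases {x a b : List Char} (h : x <+: a ++ b) : x <+: a ∨ a <+: x := by
  by_cases hl : x.length ≤ a.length
  · left
    rw [List.prefix_iff_eq_take] at h ⊢
    rwa [List.take_append_of_le_length hl] at h
  · right
    have hl' : a.length ≤ x.length := by omega
    rw [List.prefix_iff_eq_take] at h
    rw [List.prefix_iff_eq_take, h]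
    rw [List.take_take, min_eq_left hl', List.take_append_of_le_length le_rfl]
    simp

theorem go_eq (w : List Char) (hw : w ≠ []) :
    ∀ (fuel : Nat) (l acc : List Char), l.length ≤ fuel →
      PySem.Chars.replace.go w "unknown".toList fuel l acc = acc.reverse ++ repS w l := by
  intro fuel
  induction fuel with
  | zero =>
    intro l acc h
    have : l = [] := List.eq_nil_of_length_eq_zero (by omega)
    subst this
    simp [PySem.Chars.replace.go, repS]
  | succ n ih =>
    intro l acc h
    cases l with
    | nil => simp [PySem.Chars.replace.go, repS]
    | cons c t =>
      simp only [PySem.Chars.replace.go]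
      by_cases hp : w.isPrefixOf (c :: t)
      · rw [if_pos hp]
        obtain ⟨a, w', rfl⟩ : ∃ a w', w = a :: w' := by
          cases w with | nil => exact absurd rfl hw | cons a w' => exact ⟨a, w', rfl⟩
        have hlen : (List.drop (a :: w').length (c :: t)).length ≤ n := by
          simp only [List.length_drop, List.length_cons] at *
          omega
        rw [ih _ _ hlen]
        simp only [repS, if_pos hp, List.length_cons]
        simp [List.drop]
      · rw [if_neg hp, ih t (c :: acc) (by simp at h ⊢; omega)]
        simp only [repS]
        rw [if_neg hp]
        simp

theorem replace_eq_repS (s w : List Char) (hw : w ≠ []) :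
    PySem.Chars.replace s w "unknown".toList = repS w s := by
  unfold PySem.Chars.replace
  rw [if_neg (by simpa using hw)]
  simpa using go_eq w hw s.length s [] le_rfl

-- v is a proper nonempty tail of some fabric word
def tailOf (v : List Char) : Prop :=
  ∃ x ∈ fabricWords, ∃ p, 1 ≤ p ∧ p < x.length ∧ v = x.drop p

theorem dec_len : ∀ w ∈ fabricWords, 5 ≤ w.length ∧ w.length ≤ 7 := by decide

theorem dec_tail : ∀ x ∈ fabricWords, ∀ p, 1 ≤ p → p < x.length →
    (∀ w ∈ fabricWords, ¬ (x.drop p <+: w) ∧ ¬ (w <+: x.drop p)) ∧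
    ¬ (x.drop p <+: "unknown".toList) := by
  have h : ∀ x ∈ fabricWords, ∀ p ∈ [1,2,3,4,5,6], p < x.length →
      (∀ w ∈ fabricWords, ¬ (x.drop p <+: w) ∧ ¬ (w <+: x.drop p)) ∧
      ¬ (x.drop p <+: "unknown".toList) := by decide
  intro x hx p hp1 hp2
  have hx7 := (dec_len x hx).2
  have hp7 : p < 7 := by omega
  exact h x hx p (by interval_cases p <;> simp) hp2

theorem dec_word : ∀ x ∈ fabricWords, ∀ w ∈ fabricWords, x ≠ w → ¬ (x <+: w) ∧ ¬ (w <+: x) := by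
  decide

theorem dec_unk : ∀ w ∈ fabricWords, ∀ p < 7, ¬ ("unknown".toList.drop p <+: w) ∧ ¬ (w <+: "unknown".toList.drop p) := by
  have h : ∀ w ∈ fabricWords, ∀ p ∈ [0,1,2,3,4,5,6], ¬ ("unknown".toList.drop p <+: w) ∧ ¬ (w <+: "unknown".toList.drop p) := by decide
  intro w hw p hp
  exact h w hw p (by interval_cases p <;> simp)

theorem unk_len : ("unknown".toList).length = 7 := by decide

-- no fabric word starts at a position that is a proper tail of a fabric word
theorem word_not_pref_tail {v r w : List Char} (hv : tailOf v) (hw : w ∈ fabricWords) :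
    ¬ w <+: v ++ r := by
  intro h
  obtain ⟨x, hx, p, hp1, hp2, rfl⟩ := hv
  rcases pref_cases h with h' | h'
  · exact (dec_tail x hx p hp1 hp2).1 w hw |>.2 h'
  · exact (dec_tail x hx p hp1 hp2).1 w hw |>.1 h'

-- no fabric word starts inside (a tail of) the replacement "unknown"
theorem word_not_pref_unk {r w : List Char} (p : Nat) (hp : p < 7) (hw : w ∈ fabricWords) :
    ¬ w <+: ("unknown".toList.drop p) ++ r := by
  intro h
  rcases pref_cases h with h' | h'
  · exact (dec_unk w hw p hp).2 h'
  · exact (dec_unk w hw p hp).1 h'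

-- an occurrence of a proper word tail as a prefix survives a replace pass backwards
theorem lemP {w : List Char} :
    ∀ (n : Nat) (t v : List Char), t.length ≤ n → tailOf v → v <+: repS w t → v <+: t := by
  intro n
  induction n with
  | zero =>
    intro t v ht hv h
    have : t = [] := List.eq_nil_of_length_eq_zero (by omega)
    subst this
    simp only [repS] at h
    exact h
  | succ n ih =>
    intro t v ht hv h
    cases t with
    | nil => simpa [repS] using h
    | cons c tt =>
      by_cases hp : w.isPrefixOf (c :: tt)
      · exfalso
        simp only [repS] at h
        rw [if_pos hp] at h
        rcases pref_cases h with h' | h'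
        · -- v <+: "unknown", but v is a proper word tail
          obtain ⟨x, hx, p, hp1, hp2, rfl⟩ := hv
          exact (dec_tail x hx p hp1 hp2).2 h'
        · -- "unknown" <+: v: impossible, v too short
          have h1 := h'.length_le
          obtain ⟨x, hx, p, hp1, hp2, rfl⟩ := hv
          have := (dec_len x hx).2
          simp [List.length_drop] at h1
          omega
      · simp only [repS] at h
        rw [if_neg hp] at h
        cases v with
        | nil => exact List.nil_prefix
        | cons d v' =>
          rw [List.cons_prefix_cons] at h
          obtain ⟨rfl, hv'⟩ := h
          cases hv'e : v' with
          | nil => simp [List.cons_prefix_cons]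
          | cons e v'' =>
            rw [← hv'e]
            have hv'tail : tailOf v' := by
              obtain ⟨x, hx, p, hp1, hp2, hdrop⟩ := hv
              refine ⟨x, hx, p + 1, by omega, ?_, ?_⟩
              · have : v'.length = x.length - (p + 1) := by
                  have := congrArg List.length hdrop
                  simp at this
                  omega
                have hne : v' ≠ [] := by rw [hv'e]; simp
                have : 0 < x.length - (p + 1) := by
                  rcases Nat.eq_zero_or_pos (x.length - (p+1)) with h0 | h0
                  · exact absurd (List.eq_nil_of_length_eq_zero (by omega)) hne
                  · exact h0
                omega
              · have := congrArg (List.drop 1) hdrop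
                simpa [List.drop_drop, Nat.add_comm] using this
            have := ih tt v' (by simp at ht; omega) hv'tail hv'
            exact List.cons_prefix_cons.mpr ⟨rfl, this⟩

-- an occurrence of a proper word tail as a prefix survives a replace pass forwards
theorem presPref {w : List Char} (hw : w ∈ fabricWords) :
    ∀ (v t : List Char), tailOf v → v <+: t → v <+: repS w t := by
  intro v
  induction v with
  | nil => intro t _ _; exact List.nil_prefix
  | cons d v' ih =>
    intro t hv h
    obtain ⟨rest, rfl⟩ := h
    have hnp : ¬ w.isPrefixOf ((d :: v') ++ rest) := by
      rw [List.isPrefixOf_iff_prefix]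
      exact word_not_pref_tail hv hw
    simp only [List.cons_append, repS]
    rw [if_neg (by simpa using hnp)]
    cases hv'e : v' with
    | nil => simp [List.cons_prefix_cons]
    | cons e v'' =>
      rw [← hv'e]
      refine List.cons_prefix_cons.mpr ⟨rfl, ?_⟩
      have hv'tail : tailOf v' := by
        obtain ⟨x, hx, p, hp1, hp2, hdrop⟩ := hv
        refine ⟨x, hx, p + 1, by omega, ?_, ?_⟩
        · have hlen : (d :: v').length = x.length - p := by
            rw [hdrop]; simp
          have hne : v' ≠ [] := by rw [hv'e]; simp
          have : 0 < v'.length := List.length_pos_of_ne_nil hne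
          simp at hlen
          omega
        · have := congrArg (List.drop 1) hdrop
          simpa [List.drop_drop, Nat.add_comm] using this
      exact ih (v' ++ rest) hv'tail (List.prefix_append v' rest)

theorem tailOf_drop_one {w : List Char} (hw : w ∈ fabricWords) : tailOf (w.drop 1) :=
  ⟨w, hw, 1, le_rfl, by have := (dec_len w hw).1; omega, rfl⟩

-- a word matches at the head of c :: (one replace pass of t) iff it matches at c :: t
theorem headPres {wi wk : List Char} (hwi : wi ∈ fabricWords) (hwk : wk ∈ fabricWords)
    (c : Char) (t : List Char) : wi <+: c :: repS wk t ↔ wi <+: c :: t := by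
  have hne : wi ≠ [] := by
    intro h
    have := (dec_len wi hwi).1
    simp [h] at this
  obtain ⟨d, wi', rfl⟩ := List.exists_cons_of_ne_nil hne
  have htail : tailOf wi' := by simpa using tailOf_drop_one hwi
  constructor
  · intro h
    rw [List.cons_prefix_cons] at h ⊢
    exact ⟨h.1, lemP _ t wi' le_rfl htail h.2⟩
  · intro h
    rw [List.cons_prefix_cons] at h ⊢
    exact ⟨h.1, presPref hwk wi' t htail h.2⟩

theorem isIn_cons (a : List Char) (c : Char) (t : List Char) :
    PySem.Chars.isIn a (c :: t) = (a.isPrefixOf (c :: t) || PySem.Chars.isIn a t) := by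
  by_cases h : a <:+: (c :: t)
  · rw [(PySem.Chars.isIn_iff_infix a (c :: t)).mpr h]
    rcases List.infix_cons_iff.mp h with h' | h'
    · simp [List.isPrefixOf_iff_prefix.mpr h']
    · simp [(PySem.Chars.isIn_iff_infix a t).mpr h']
  · rw [(PySem.Chars.isIn_eq_false_iff a (c :: t)).mpr h]
    have h1 : ¬ a <+: (c :: t) := fun hp => h (hp.isInfix)
    have h2 : ¬ a <:+: t := fun hi => h (List.infix_cons_iff.mpr (Or.inr hi))
    rw [(PySem.Chars.isIn_eq_false_iff a t).mpr h2]
    simp only [Bool.or_false]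
    exact (Bool.eq_false_iff.mpr (fun hb => h1 (List.isPrefixOf_iff_prefix.mp hb))).symm

theorem isIn_append_skip (a : List Char) :
    ∀ (x y : List Char), (∀ p, p < x.length → ¬ a <+: (x.drop p ++ y)) →
      PySem.Chars.isIn a (x ++ y) = PySem.Chars.isIn a y := by
  intro x
  induction x with
  | nil => intro y _; simp
  | cons d x' ih =>
    intro y h
    rw [List.cons_append, isIn_cons]
    have h0 : ¬ a <+: d :: (x' ++ y) := by simpa using h 0 (by simp)
    rw [ih y (fun p hp => by simpa using h (p+1) (by simp; omega))]
    have h0' : a.isPrefixOf (d :: (x' ++ y)) = false :=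
      Bool.eq_false_iff.mpr (fun hb => h0 (List.isPrefixOf_iff_prefix.mp hb))
    simp [h0']

theorem repS_id' (w : List Char) :
    ∀ (s : List Char), (∀ j, ¬ w <+: s.drop j) → repS w s = s := by
  intro s
  induction s with
  | nil => intro _; simp [repS]
  | cons c t ih =>
    intro h
    simp only [repS]
    rw [if_neg (by simpa [List.isPrefixOf_iff_prefix] using h 0)]
    rw [ih (fun j => by simpa using h (j+1))]

theorem repS_id {w s : List Char} (h : PySem.Chars.isIn w s = false) : repS w s = s := by
  apply repS_id'
  intro j hj
  have : ∃ j, w <+: s.drop j := ⟨j, hj⟩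
  rw [PySem.Chars.exists_prefix_drop_iff_isIn] at this
  rw [h] at this
  exact absurd this (by simp)

theorem repS_append_skip (w : List Char) :
    ∀ (a r : List Char), (∀ p, p < a.length → ¬ w <+: (a.drop p ++ r)) →
      repS w (a ++ r) = a ++ repS w r := by
  intro a
  induction a with
  | nil => intro r _; simp
  | cons d a' ih =>
    intro r h
    simp only [List.cons_append, repS]
    rw [if_neg (by simpa [List.isPrefixOf_iff_prefix] using h 0 (by simp))]
    rw [ih r (fun p hp => by simpa using h (p+1) (by simp; omega))]

-- pass over a string headed by a *different* fabric word keeps that word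
theorem pass_word {wi wj : List Char} (hwi : wi ∈ fabricWords) (hwj : wj ∈ fabricWords)
    (hne : wi ≠ wj) (X : List Char) : repS wi (wj ++ X) = wj ++ repS wi X := by
  apply repS_append_skip
  intro p hp h
  rcases Nat.eq_zero_or_pos p with rfl | hp1
  · simp only [List.drop_zero] at h
    rcases pref_cases h with h' | h'
    · exact (dec_word wi hwi wj hwj hne).1 h'
    · exact (dec_word wi hwi wj hwj hne).2 h'
  · exact word_not_pref_tail ⟨wj, hwj, p, hp1, hp, rfl⟩ hwi h

-- pass over a string headed by "unknown" skips it
theorem pass_unk {wi : List Char} (hwi : wi ∈ fabricWords) (X : List Char) :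
    repS wi ("unknown".toList ++ X) = "unknown".toList ++ repS wi X := by
  apply repS_append_skip
  intro p hp h
  exact word_not_pref_unk p (by simpa [unk_len] using hp) hwi h

-- pass over a string headed by its own word replaces it
theorem pass_hit {wj : List Char} (hwj : wj ∈ fabricWords) (X : List Char) :
    repS wj (wj ++ X) = "unknown".toList ++ repS wj X := by
  have hne : wj ≠ [] := by
    intro h; have := (dec_len wj hwj).1; simp [h] at this
  obtain ⟨d, w', rfl⟩ := List.exists_cons_of_ne_nil hne
  simp only [List.cons_append, repS]
  rw [if_pos (by simp [List.isPrefixOf_iff_prefix])]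
  congr 1
  congr 1
  simp

-- occurrences of one fabric word are preserved by a replace pass of another
theorem preserve {wi wk : List Char} (hwi : wi ∈ fabricWords) (hwk : wk ∈ fabricWords)
    (hne : wi ≠ wk) :
    ∀ (n : Nat) (t : List Char), t.length ≤ n →
      PySem.Chars.isIn wi (repS wk t) = PySem.Chars.isIn wi t := by
  intro n
  induction n with
  | zero =>
    intro t ht
    have : t = [] := List.eq_nil_of_length_eq_zero (by omega)
    subst this
    simp [repS]
  | succ n ih =>
    intro t ht
    cases t with
    | nil => simp [repS]
    | cons c tt =>
      by_cases hp : wk <+: (c :: tt)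
      · obtain ⟨rest, hrest⟩ := hp
        rw [← hrest, pass_hit hwk]
        have hwk5 := (dec_len wk hwk).1
        have hrlen : rest.length ≤ n := by
          have h1 := congrArg List.length hrest
          simp at h1 ht
          omega
        rw [isIn_append_skip wi ("unknown".toList) (repS wk rest)
              (fun p hp h => word_not_pref_unk p (by simpa [unk_len] using hp) hwi h)]
        rw [ih rest hrlen]
        rw [isIn_append_skip wi wk rest (fun p hp h => by
          rcases Nat.eq_zero_or_pos p with rfl | hp1
          · simp only [List.drop_zero] at h
            rcases pref_cases h with h' | h'
            · exact (dec_word wi hwi wk hwk hne).1 h'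
            · exact (dec_word wi hwi wk hwk hne).2 h'
          · exact word_not_pref_tail ⟨wk, hwk, p, hp1, hp, rfl⟩ hwi h)]
      · simp only [repS]
        rw [if_neg (by simpa [List.isPrefixOf_iff_prefix] using hp)]
        rw [isIn_cons, isIn_cons, ih tt (by simp at ht; omega)]
        have : (wi.isPrefixOf (c :: repS wk tt)) = (wi.isPrefixOf (c :: tt)) := by
          by_cases hh : wi <+: (c :: tt)
          · rw [List.isPrefixOf_iff_prefix.mpr hh,
                List.isPrefixOf_iff_prefix.mpr ((headPres hwi hwk c tt).mpr hh)]
          · have h1 : ¬ wi <+: c :: repS wk tt := fun hc => hh ((headPres hwi hwk c tt).mp hc)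
            rw [(Bool.eq_false_iff.mpr (fun hb => h1 (List.isPrefixOf_iff_prefix.mp hb))),
                (Bool.eq_false_iff.mpr (fun hb => hh (List.isPrefixOf_iff_prefix.mp hb)))]
        rw [this]

def fabricComp (s : List Char) : List Char :=
  fabricWords.foldl (fun s w => repS w s) s

def fabricAny (s : List Char) : Bool :=
  fabricWords.any (fun w => PySem.Chars.isIn w s)

-- cons commutes with the whole fold when no fabric word matches at the head
theorem fold_cons :
    ∀ (ws : List (List Char)) (c : Char) (t : List Char),
      (∀ u ∈ ws, u ∈ fabricWords) → (∀ u ∈ fabricWords, ¬ u <+: (c :: t)) →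
      List.foldl (fun s w => repS w s) (c :: t) ws = c :: List.foldl (fun s w => repS w s) t ws := by
  intro ws
  induction ws with
  | nil => intro c t _ _; simp
  | cons u ws' ih =>
    intro c t hmem hsafe
    have hu : u ∈ fabricWords := hmem u (by simp)
    have h1 : repS u (c :: t) = c :: repS u t := by
      simp only [repS]
      rw [if_neg (by simpa [List.isPrefixOf_iff_prefix] using hsafe u hu)]
    simp only [List.foldl_cons, h1]
    exact ih c (repS u t) (fun v hv => hmem v (by simp [hv]))
      (fun v hv hcon => hsafe v hv ((headPres hv hu c t).mp hcon))

-- the whole fold turns a leading fabric word into "unknown"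
theorem fold_hit {w : List Char} (hw : w ∈ fabricWords) :
    ∀ (X : List Char),
      List.foldl (fun s v => repS v s) (w ++ X) fabricWords
        = "unknown".toList ++ List.foldl (fun s v => repS v s) X fabricWords := by
  intro X
  fin_cases hw
  · simp only [fabricWords, List.foldl_cons, List.foldl_nil]
    rw [pass_hit (wj := "viscose".toList) (by decide)]
    rw [pass_unk (wi := "acetate".toList) (by decide)]
    rw [pass_unk (wi := "rayon".toList) (by decide)]
    rw [pass_unk (wi := "Viscose".toList) (by decide)]
    rw [pass_unk (wi := "Acetate".toList) (by decide)]
    rw [pass_unk (wi := "Rayon".toList) (by decide)]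
  · simp only [fabricWords, List.foldl_cons, List.foldl_nil]
    rw [pass_word (wi := "viscose".toList) (wj := "acetate".toList) (by decide) (by decide) (by decide)]
    rw [pass_hit (wj := "acetate".toList) (by decide)]
    rw [pass_unk (wi := "rayon".toList) (by decide)]
    rw [pass_unk (wi := "Viscose".toList) (by decide)]
    rw [pass_unk (wi := "Acetate".toList) (by decide)]
    rw [pass_unk (wi := "Rayon".toList) (by decide)]
  · simp only [fabricWords, List.foldl_cons, List.foldl_nil]
    rw [pass_word (wi := "viscose".toList) (wj := "rayon".toList) (by decide) (by decide) (by decide)]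
    rw [pass_word (wi := "acetate".toList) (wj := "rayon".toList) (by decide) (by decide) (by decide)]
    rw [pass_hit (wj := "rayon".toList) (by decide)]
    rw [pass_unk (wi := "Viscose".toList) (by decide)]
    rw [pass_unk (wi := "Acetate".toList) (by decide)]
    rw [pass_unk (wi := "Rayon".toList) (by decide)]
  · simp only [fabricWords, List.foldl_cons, List.foldl_nil]
    rw [pass_word (wi := "viscose".toList) (wj := "Viscose".toList) (by decide) (by decide) (by decide)]
    rw [pass_word (wi := "acetate".toList) (wj := "Viscose".toList) (by decide) (by decide) (by decide)]
    rw [pass_word (wi := "rayon".toList) (wj := "Viscose".toList) (by decide) (by decide) (by decide)]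
    rw [pass_hit (wj := "Viscose".toList) (by decide)]
    rw [pass_unk (wi := "Acetate".toList) (by decide)]
    rw [pass_unk (wi := "Rayon".toList) (by decide)]
  · simp only [fabricWords, List.foldl_cons, List.foldl_nil]
    rw [pass_word (wi := "viscose".toList) (wj := "Acetate".toList) (by decide) (by decide) (by decide)]
    rw [pass_word (wi := "acetate".toList) (wj := "Acetate".toList) (by decide) (by decide) (by decide)]
    rw [pass_word (wi := "rayon".toList) (wj := "Acetate".toList) (by decide) (by decide) (by decide)]
    rw [pass_word (wi := "Viscose".toList) (wj := "Acetate".toList) (by decide) (by decide) (by decide)]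
    rw [pass_hit (wj := "Acetate".toList) (by decide)]
    rw [pass_unk (wi := "Rayon".toList) (by decide)]
  · simp only [fabricWords, List.foldl_cons, List.foldl_nil]
    rw [pass_word (wi := "viscose".toList) (wj := "Rayon".toList) (by decide) (by decide) (by decide)]
    rw [pass_word (wi := "acetate".toList) (wj := "Rayon".toList) (by decide) (by decide) (by decide)]
    rw [pass_word (wi := "rayon".toList) (wj := "Rayon".toList) (by decide) (by decide) (by decide)]
    rw [pass_word (wi := "Viscose".toList) (wj := "Rayon".toList) (by decide) (by decide) (by decide)]
    rw [pass_word (wi := "Acetate".toList) (wj := "Rayon".toList) (by decide) (by decide) (by decide)]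
    rw [pass_hit (wj := "Rayon".toList) (by decide)]

theorem scan_eq : ∀ (n : Nat) (t : List Char), t.length ≤ n →
    fabricScan t = (fabricAny t, fabricComp t) := by
  intro n
  induction n with
  | zero =>
    intro t ht
    have : t = [] := List.eq_nil_of_length_eq_zero (by omega)
    subst this
    simp only [fabricScan, fabricAny, fabricComp, fabricWords,
      List.any_cons, List.any_nil, List.foldl_cons, List.foldl_nil, repS]
    decide
  | succ n ih =>
    intro t ht
    cases t with
    | nil =>
      simp only [fabricScan, fabricAny, fabricComp, fabricWords,
        List.any_cons, List.any_nil, List.foldl_cons, List.foldl_nil, repS]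
      decide
    | cons c tt =>
      cases hf : fabricWords.find? (fun w => w.isPrefixOf (c :: tt)) with
      | none =>
        have hnone : ∀ u ∈ fabricWords, ¬ u <+: (c :: tt) := by
          intro u hu hcon
          have := List.find?_eq_none.mp hf u hu
          exact this (List.isPrefixOf_iff_prefix.mpr hcon)
        have hscan : fabricScan (c :: tt) = ((fabricScan tt).1, c :: (fabricScan tt).2) := by
          rw [fabricScan, hf]
        rw [hscan, ih tt (by simp at ht; omega)]
        have hany : fabricAny (c :: tt) = fabricAny tt := by
          have hone : ∀ w ∈ fabricWords, PySem.Chars.isIn w (c :: tt) = PySem.Chars.isIn w tt := by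
            intro w hw
            rw [isIn_cons]
            have : w.isPrefixOf (c :: tt) = false :=
              Bool.eq_false_iff.mpr (fun hb => hnone w hw (List.isPrefixOf_iff_prefix.mp hb))
            simp [this]
          simp only [fabricAny, fabricWords, List.any_cons, List.any_nil]
          rw [hone "viscose".toList (by decide), hone "acetate".toList (by decide),
              hone "rayon".toList (by decide), hone "Viscose".toList (by decide),
              hone "Acetate".toList (by decide), hone "Rayon".toList (by decide)]
        have hcomp : fabricComp (c :: tt) = c :: fabricComp tt :=
          fold_cons fabricWords c tt (fun u hu => hu) hnone
        rw [hany, hcomp]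
      | some w =>
        have hw : w ∈ fabricWords := List.mem_of_find?_eq_some hf
        have hp0 : w.isPrefixOf (c :: tt) = true := by simpa using List.find?_some hf
        have hwpre : w <+: (c :: tt) := List.isPrefixOf_iff_prefix.mp hp0
        obtain ⟨rest, hsplit⟩ := hwpre
        have hw5 := (dec_len w hw).1
        have hrest : tt.drop (w.length - 1) = rest := by
          have h1 := congrArg (List.drop w.length) hsplit
          rw [List.drop_left] at h1
          rw [h1]
          obtain ⟨d, w', rfl⟩ := List.exists_cons_of_ne_nil
            (show w ≠ [] by intro h; simp [h] at hw5)
          simp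
        have hscan : fabricScan (c :: tt) = (true, "unknown".toList ++ (fabricScan (tt.drop (w.length - 1))).2) := by
          rw [fabricScan, hf]
        rw [hscan, hrest]
        have hrlen : rest.length ≤ n := by
          have h1 := congrArg List.length hsplit
          simp at h1 ht
          omega
        rw [ih rest hrlen]
        have hany : fabricAny (c :: tt) = true := by
          apply List.any_eq_true.mpr
          refine ⟨w, hw, (PySem.Chars.isIn_iff_infix w (c :: tt)).mpr ?_⟩
          rw [← hsplit]
          exact (List.prefix_append w rest).isInfix
        have hcomp : fabricComp (c :: tt) = "unknown".toList ++ fabricComp rest := by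
          rw [← hsplit]
          exact fold_hit hw rest
        rw [hany, hcomp]

-- one pass of A's loop, on a state carried as (flag, String.ofList cs)
theorem stepA_eq (w : String) (hw : w.toList ∈ fabricWords) (f : Bool) (cs : List Char) :
    (if PySem.Str.isIn w (String.ofList cs) then
       (true, PySem.Str.replace (String.ofList cs) w "unknown")
     else (f, String.ofList cs))
      = (f || PySem.Chars.isIn w.toList cs, String.ofList (repS w.toList cs)) := by
  have hne : w.toList ≠ [] := by
    intro h
    have := (dec_len w.toList hw).1
    simp [h] at this
  have hIn : PySem.Str.isIn w (String.ofList cs) = PySem.Chars.isIn w.toList cs := by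
    rw [PySem.Str.isIn_eq]
    simp
  cases hb : PySem.Chars.isIn w.toList cs with
  | true =>
    rw [if_pos (by rw [hIn, hb])]
    simp only [Bool.or_true]
    unfold PySem.Str.replace
    congr 1
    simp only [String.toList_ofList]
    rw [show "unknown".toList = "unknown".toList from rfl]
    rw [replace_eq_repS cs w.toList hne]
  | false =>
    rw [if_neg (by rw [hIn, hb]; simp)]
    rw [repS_id hb]
    simp

theorem fab_main (text : String) : remove_artificial_fabric text = remove_artificial_fabric_alt text := by
  unfold remove_artificial_fabric remove_artificial_fabric_alt
  rw [scan_eq text.toList.length text.toList le_rfl]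
  simp only [List.foldl_cons, List.foldl_nil]
  rw [show text = String.ofList text.toList from (String.ofList_toList (s := text)).symm]
  rw [stepA_eq "viscose" (by decide), stepA_eq "acetate" (by decide),
      stepA_eq "rayon" (by decide), stepA_eq "Viscose" (by decide),
      stepA_eq "Acetate" (by decide), stepA_eq "Rayon" (by decide)]
  set s := (String.ofList text.toList).toList with hs
  -- pull every membership flag back to the original string via `preserve`
  rw [preserve (wi := "acetate".toList) (wk := "viscose".toList) (by decide) (by decide) (by decide) _ _ le_rfl]
  rw [preserve (wi := "rayon".toList) (wk := "acetate".toList) (by decide) (by decide) (by decide) _ _ le_rfl]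
  rw [preserve (wi := "rayon".toList) (wk := "viscose".toList) (by decide) (by decide) (by decide) _ _ le_rfl]
  rw [preserve (wi := "Viscose".toList) (wk := "rayon".toList) (by decide) (by decide) (by decide) _ _ le_rfl]
  rw [preserve (wi := "Viscose".toList) (wk := "acetate".toList) (by decide) (by decide) (by decide) _ _ le_rfl]
  rw [preserve (wi := "Viscose".toList) (wk := "viscose".toList) (by decide) (by decide) (by decide) _ _ le_rfl]
  rw [preserve (wi := "Acetate".toList) (wk := "Viscose".toList) (by decide) (by decide) (by decide) _ _ le_rfl]
  rw [preserve (wi := "Acetate".toList) (wk := "rayon".toList) (by decide) (by decide) (by decide) _ _ le_rfl]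
  rw [preserve (wi := "Acetate".toList) (wk := "acetate".toList) (by decide) (by decide) (by decide) _ _ le_rfl]
  rw [preserve (wi := "Acetate".toList) (wk := "viscose".toList) (by decide) (by decide) (by decide) _ _ le_rfl]
  rw [preserve (wi := "Rayon".toList) (wk := "Acetate".toList) (by decide) (by decide) (by decide) _ _ le_rfl]
  rw [preserve (wi := "Rayon".toList) (wk := "Viscose".toList) (by decide) (by decide) (by decide) _ _ le_rfl]
  rw [preserve (wi := "Rayon".toList) (wk := "rayon".toList) (by decide) (by decide) (by decide) _ _ le_rfl]
  rw [preserve (wi := "Rayon".toList) (wk := "acetate".toList) (by decide) (by decide) (by decide) _ _ le_rfl]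
  rw [preserve (wi := "Rayon".toList) (wk := "viscose".toList) (by decide) (by decide) (by decide) _ _ le_rfl]
  simp only [hs, String.toList_ofList]
  simp [fabricAny, fabricComp, fabricWords, List.any_cons, List.any_nil,
    List.foldl_cons, List.foldl_nil, Bool.or_assoc]

-- ===== VERDICT (by name: the statement is the Claim_ definition above) =====
theorem remove_artificial_fabric_spec : Claim_equal_remove_artificial_fabric := by
  intro text _
  unfold Spec_remove_artificial_fabric
  exact fab_main text
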